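-- pv_equiv track=rewrite | github.com/him55710-sudo/uni-foli | backend/services/render/src/unifoli_render/diagnosis_report_pdf_renderer.py | _markdown_to_lines
-- ===== SOURCE A (Python) =====
-- def _markdown_to_lines(markdown: str) -> list[str]:
--     if not markdown:
--         return []
--     lines = [line.rstrip() for line in markdown.replace("\r\n", "\n").split("\n")]
--     normalized: list[str] = []
--     for line in lines:
--         if line.startswith("### "):
--             normalized.append(line[4:])
--             continue
--         if line.startswith("## "):
--             normalized.append(line[3:])
--             continue
--         if line.startswith("# "):
--             normalized.append(line[2:])
--             continue
--         normalized.append(line)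
--     return normalized
-- ===== SOURCE B (Python) =====
-- def _finish_line(chars: list) -> str:
--     while chars and chars[-1].isspace():
--         chars.pop()
--     s = "".join(chars)
--     for p in ("### ", "## ", "# "):
--         if s.startswith(p):
--             return s[len(p):]
--     return s
--
--
-- def _markdown_to_lines(markdown: str) -> list[str]:
--     if not markdown:
--         return []
--     out: list = []
--     line: list = []
--     i, n = 0, len(markdown)
--     while i < n:
--         c = markdown[i]
--         if c == "\n":
--             out.append(_finish_line(line))
--             line = []
--             i += 1
--         elif c == "\r" and i + 1 < n and markdown[i + 1] == "\n":
--             out.append(_finish_line(line))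
--             line = []
--             i += 2
--         else:
--             line.append(c)
--             i += 1
--     out.append(_finish_line(line))
--     return out
-- ===== Notes on version B (the rewrite author's own statement) =====
-- stated objective: alternative
-- what changed: Replaces A's staged pipeline (global replacement, split on newline, per-line rstrip comprehension, accumulator loop of cascaded startswith branches) with a single fused character-by-character scanner that breaks lines at or as it goes and finishes each line (trailing-whitespace pop plus a prefix-table loop) at the break point.
import Mathlib
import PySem

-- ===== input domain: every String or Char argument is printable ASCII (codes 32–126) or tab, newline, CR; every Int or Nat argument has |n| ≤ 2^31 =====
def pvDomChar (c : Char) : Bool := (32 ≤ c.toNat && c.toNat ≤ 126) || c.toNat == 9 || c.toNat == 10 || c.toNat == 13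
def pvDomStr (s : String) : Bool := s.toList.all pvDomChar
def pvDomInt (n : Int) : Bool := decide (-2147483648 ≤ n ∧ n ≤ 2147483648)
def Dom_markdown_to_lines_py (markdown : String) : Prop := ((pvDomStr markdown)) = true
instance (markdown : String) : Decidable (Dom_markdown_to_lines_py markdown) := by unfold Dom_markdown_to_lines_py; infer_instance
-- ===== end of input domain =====

-- B replaces A's staged pipeline (replace \r\n, split, rstrip comprehension, startswith cascade
-- with an accumulator loop) by one fused character scanner that breaks lines at \n / \r\n as it
-- goes and finishes each line at its break point (objective: alternative, same cost).


-- ===== PORT A =====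
-- Port of A: rstrip each line of the \r\n-normalized split, then an accumulator loop
-- with three cascaded startswith branches.
def markdown_to_lines_py (markdown : String) : List String :=
  if markdown = "" then []
  else
    let lines := (PySem.Chars.splitOn (PySem.Str.replace markdown "\r\n" "\n").toList ['\n']).map
      (fun cs => PySem.Str.rstrip (String.ofList cs))
    lines.foldl (fun acc line =>
      if PySem.Str.startswith line "### " then acc ++ [PySem.Str.slice line (some 4) none]
      else if PySem.Str.startswith line "## " then acc ++ [PySem.Str.slice line (some 3) none]
      else if PySem.Str.startswith line "# " then acc ++ [PySem.Str.slice line (some 2) none]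
      else acc ++ [line]) []

-- ===== PORT B =====
-- Source B's _finish_line: pop trailing whitespace from the collected chars, then try the
-- prefix table ("### ", "## ", "# ") in order.
def pvStripTable : List String → String → String
  | [], s => s
  | p :: ps, s =>
    if PySem.Str.startswith s p then PySem.Str.slice s (some (PySem.Str.len p)) none
    else pvStripTable ps s

def pvFinishLine (chars : List Char) : String :=
  pvStripTable ["### ", "## ", "# "]
    (String.ofList ((chars.reverse.dropWhile PySem.Chars.isspace).reverse))

-- Source B's while loop: one pass over the characters, breaking a line at '\n' or at '\r''\n'.
def pvScan : List Char → List Char → List String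
  | [], line => [pvFinishLine line]
  | '\n' :: rest, line => pvFinishLine line :: pvScan rest []
  | '\r' :: '\n' :: rest, line => pvFinishLine line :: pvScan rest []
  | c :: rest, line => pvScan rest (line ++ [c])

def markdown_to_lines_py_alt (markdown : String) : List String :=
  if markdown = "" then [] else pvScan markdown.toList []

-- ===== PRECONDITION & SPEC =====
def Spec_markdown_to_lines_py (markdown : String) (out : List String) : Prop := out = markdown_to_lines_py_alt markdown
instance (markdown : String) (out : List String) : Decidable (Spec_markdown_to_lines_py markdown out) := by unfold Spec_markdown_to_lines_py; infer_instance

-- ===== CLAIM =====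
def Claim_equal_markdown_to_lines_py : Prop := ∀ (markdown : String), Dom_markdown_to_lines_py markdown → Spec_markdown_to_lines_py markdown (markdown_to_lines_py markdown)

-- ===== LEMMAS AND PROOFS =====

-- functional version of A's replace "\r\n" "\n" pass
def pvRep : List Char → List Char
  | [] => []
  | '\r' :: '\n' :: r => '\n' :: pvRep r
  | c :: r => c :: pvRep r

def pvConsHead (c : Char) : List (List Char) → List (List Char)
  | [] => [[c]]
  | l :: ls => (c :: l) :: ls

-- functional version of A's split on '\n'
def pvSplit : List Char → List (List Char)
  | [] => [[]]
  | '\n' :: r => [] :: pvSplit r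
  | c :: r => pvConsHead c (pvSplit r)

def pvPre (pre : List Char) : List (List Char) → List (List Char)
  | [] => [pre]
  | l :: ls => (pre ++ l) :: ls

theorem pvRep_cons (c : Char) (t : List Char) (h : c ≠ '\r' ∨ t.head? ≠ some '\n') :
    pvRep (c :: t) = c :: pvRep t := by
  rcases t with _ | ⟨c2, t2⟩
  · by_cases hc : c = '\r' <;> simp [hc, pvRep]
  · by_cases hc : c = '\r'
    · subst hc
      by_cases hc2 : c2 = '\n'
      · subst hc2; simp at h
      · simp [pvRep, hc2]
    · simp [pvRep, hc]

theorem pvSplit_cons (c : Char) (t : List Char) (hc : c ≠ '\n') :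
    pvSplit (c :: t) = pvConsHead c (pvSplit t) := by
  simp [pvSplit]

theorem pvSplit_ne_nil (l : List Char) : pvSplit l ≠ [] := by
  fun_induction pvSplit l with
  | case1 => simp
  | case2 r ih => simp
  | case3 c r h ih => rcases h' : pvSplit r with _ | ⟨x, xs⟩ <;> simp [pvConsHead]

theorem pvPre_nil (l : List Char) : pvPre [] (pvSplit l) = pvSplit l := by
  rcases h : pvSplit l with _ | ⟨x, xs⟩
  · exact absurd h (pvSplit_ne_nil l)
  · simp [pvPre]

theorem pvPre_consHead (pre : List Char) (c : Char) (X : List (List Char)) :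
    pvPre pre (pvConsHead c X) = pvPre (pre ++ [c]) X := by
  cases X <;> simp [pvPre, pvConsHead]

theorem pvRep_go (fuel : Nat) :
    ∀ (l acc : List Char), l.length ≤ fuel →
      PySem.Chars.replace.go ['\r', '\n'] ['\n'] fuel l acc = acc.reverse ++ pvRep l := by
  induction fuel with
  | zero =>
    intro l acc h
    rw [PySem.Chars.replace.go.eq_def]
    cases l with
    | nil => simp [pvRep]
    | cons c t => simp at h
  | succ n ih =>
    intro l acc h
    rw [PySem.Chars.replace.go.eq_def]
    rcases l with _ | ⟨c, t⟩
    · simp [pvRep]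
    · by_cases hp : List.isPrefixOf ['\r', '\n'] (c :: t)
      · obtain ⟨s, hs⟩ := List.isPrefixOf_iff_prefix.mp hp
        obtain ⟨rfl, rfl⟩ : c = '\r' ∧ t = '\n' :: s := by
          refine ⟨?_, ?_⟩ <;> cases hs <;> rfl
        simp only [hp, if_true, List.length_cons, List.length_nil, List.drop_succ_cons,
          List.drop_zero, List.reverse_cons, List.reverse_nil, List.nil_append]
        rw [ih s _ (by simp at h; omega)]
        simp [pvRep]
      · have hside : c ≠ '\r' ∨ t.head? ≠ some '\n' := by
          by_contra hcon
          push Not at hcon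
          obtain ⟨rfl, ht⟩ := hcon
          rcases t with _ | ⟨c2, t2⟩
          · simp at ht
          · simp at ht
            subst ht
            exact hp (by simp [List.isPrefixOf])
        simp only [hp, Bool.false_eq_true, if_false]
        rw [ih t _ (by simp at h ⊢; omega), pvRep_cons c t hside]
        simp

theorem pvSplit_go (fuel : Nat) :
    ∀ (l cur : List Char) (acc : List (List Char)), l.length < fuel →
      PySem.Chars.splitOn.go ['\n'] fuel l cur acc = acc.reverse ++ pvPre cur.reverse (pvSplit l) := by
  induction fuel with
  | zero => intro l cur acc h; omega
  | succ n ih =>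
    intro l cur acc h
    rw [PySem.Chars.splitOn.go.eq_def]
    rcases l with _ | ⟨c, t⟩
    · simp [pvSplit, pvPre]
    · by_cases hc : c = '\n'
      · subst hc
        have hp : List.isPrefixOf ['\n'] ('\n' :: t) = true := by simp [List.isPrefixOf]
        simp only [hp, if_true, List.length_cons, List.length_nil, List.drop_succ_cons, List.drop_zero]
        rw [ih t _ _ (by simp at h; omega)]
        simp only [List.reverse_nil]
        rw [pvPre_nil, show pvSplit ('\n' :: t) = [] :: pvSplit t from by simp [pvSplit]]
        simp [pvPre]
      · have hp : List.isPrefixOf ['\n'] (c :: t) = false := by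
          simp [List.isPrefixOf]
          exact fun h' => absurd h'.symm hc
        simp only [hp, Bool.false_eq_true, if_false]
        rw [ih t _ _ (by simp at h ⊢; omega), pvSplit_cons c t hc, pvPre_consHead]
        simp

-- A's per-line cascade, named for the proof
def pvCascade (line : String) : String :=
  if PySem.Str.startswith line "### " then PySem.Str.slice line (some 4) none
  else if PySem.Str.startswith line "## " then PySem.Str.slice line (some 3) none
  else if PySem.Str.startswith line "# " then PySem.Str.slice line (some 2) none
  else line

-- A's per-line cascade is Source B's _finish_line on the raw piece
theorem pvFinish_eq (piece : List Char) :
    pvCascade (PySem.Str.rstrip (String.ofList piece)) = pvFinishLine piece := by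
  simp [pvCascade, pvFinishLine, pvStripTable, PySem.Str.rstrip, PySem.Chars.rstrip, PySem.Str.len]

-- the fused scanner computes "split after replace", line by line
theorem pvScan_eq (cs line : List Char) :
    pvScan cs line = (pvPre line (pvSplit (pvRep cs))).map pvFinishLine := by
  fun_induction pvScan cs line with
  | case1 line => simp [pvRep, pvSplit, pvPre]
  | case2 rest line ih =>
    rw [show pvRep ('\n' :: rest) = '\n' :: pvRep rest from pvRep_cons _ _ (Or.inl (by decide)),
      show pvSplit ('\n' :: pvRep rest) = [] :: pvSplit (pvRep rest) from by simp [pvSplit]]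
    rw [ih, pvPre_nil]
    simp [pvPre]
  | case3 rest line ih =>
    rw [show pvRep ('\r' :: '\n' :: rest) = '\n' :: pvRep rest from by simp [pvRep],
      show pvSplit ('\n' :: pvRep rest) = [] :: pvSplit (pvRep rest) from by simp [pvSplit]]
    rw [ih, pvPre_nil]
    simp [pvPre]
  | case4 c rest line h1 h2 ih =>
    have hc : c ≠ '\n' := by simpa using h1
    have hside : c ≠ '\r' ∨ rest.head? ≠ some '\n' := by
      by_contra hcon
      push Not at hcon
      obtain ⟨rfl, ht⟩ := hcon
      rcases rest with _ | ⟨c2, t2⟩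
      · simp at ht
      · simp at ht
        subst ht
        exact h2 t2 rfl rfl
    rw [ih, pvRep_cons c rest hside, pvSplit_cons c _ hc, pvPre_consHead]

-- ===== VERDICT =====
set_option maxHeartbeats 1000000 in
theorem markdown_to_lines_py_spec : Claim_equal_markdown_to_lines_py := by
  intro md _
  unfold Spec_markdown_to_lines_py markdown_to_lines_py markdown_to_lines_py_alt
  by_cases hmd : md = ""
  · simp [hmd]
  · rw [if_neg hmd, if_neg hmd]
    have hstep : (fun (acc : List String) (line : String) =>
        if PySem.Str.startswith line "### " then acc ++ [PySem.Str.slice line (some 4) none]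
        else if PySem.Str.startswith line "## " then acc ++ [PySem.Str.slice line (some 3) none]
        else if PySem.Str.startswith line "# " then acc ++ [PySem.Str.slice line (some 2) none]
        else acc ++ [line]) =
        (fun acc line => acc ++ [pvCascade line]) := by
      funext acc line; simp only [pvCascade]; split_ifs <;> rfl
    rw [hstep, PySem.List.foldl_append_singleton_eq_map, List.map_map]
    have hrep : (PySem.Str.replace md "\r\n" "\n").toList = pvRep md.toList := by
      simp only [PySem.Str.replace, PySem.Chars.replace]
      rw [show ("\r\n").toList = ['\r','\n'] from rfl, show ("\n").toList = ['\n'] from rfl]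
      simp only [List.isEmpty_cons, Bool.false_eq_true, if_false]
      rw [pvRep_go md.toList.length md.toList [] le_rfl]
      simp
    have hsplit : PySem.Chars.splitOn (pvRep md.toList) ['\n'] = pvSplit (pvRep md.toList) := by
      rw [PySem.Chars.splitOn, pvSplit_go _ _ _ _ (Nat.lt_succ_self _)]
      simp [pvPre_nil]
    rw [hrep, hsplit, pvScan_eq, pvPre_nil]
    simp only [List.nil_append]
    exact List.map_congr_left (fun piece _ => pvFinish_eq piece)
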